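-- pv_equiv track=rewrite | github.com/simonholliday/subsequence | subsequence/sequence_utils.py | generate_legato_durations
-- ===== SOURCE A (Python) =====
-- import typing
--
-- def generate_legato_durations (hits: typing.List[int]) -> typing.List[int]:
--
-- 	"""
-- 	Convert a hit list into per-step legato durations.
-- 	"""
--
-- 	if not hits:
-- 		return []
--
-- 	note_on_indices = [idx for idx, hit in enumerate(hits) if hit]
-- 	note_on_indices.append(len(hits))
--
-- 	durations = [0] * len(hits)
--
-- 	for idx, next_idx in zip(note_on_indices[:-1], note_on_indices[1:]):
-- 		durations[idx] = max(1, next_idx - idx)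
--
-- 	return durations
-- ===== SOURCE B (Python) =====
-- import typing
--
-- def generate_legato_durations (hits: typing.List[int]) -> typing.List[int]:
--
-- 	"""
-- 	Convert a hit list into per-step legato durations.
--
-- 	Single reverse pass: walk the hits right-to-left carrying `gap`,
-- 	the distance from the current step to the next note-on (or the end).
-- 	"""
--
-- 	gap = 0
-- 	durations = []
-- 	for hit in reversed(hits):
-- 		gap += 1
-- 		durations.append(gap if hit else 0)
-- 		if hit:
-- 			gap = 0
-- 	durations.reverse()
-- 	return durations
-- ===== Notes on version B (the rewrite author's own statement) =====
-- stated objective: faster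
-- what changed: Replaces A's two-phase construction (collect all note-on indices, zip consecutive pairs, write into a preallocated array) by a single reverse pass that carries the running distance to the next onset and emits each step's duration directly.
import Mathlib
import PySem

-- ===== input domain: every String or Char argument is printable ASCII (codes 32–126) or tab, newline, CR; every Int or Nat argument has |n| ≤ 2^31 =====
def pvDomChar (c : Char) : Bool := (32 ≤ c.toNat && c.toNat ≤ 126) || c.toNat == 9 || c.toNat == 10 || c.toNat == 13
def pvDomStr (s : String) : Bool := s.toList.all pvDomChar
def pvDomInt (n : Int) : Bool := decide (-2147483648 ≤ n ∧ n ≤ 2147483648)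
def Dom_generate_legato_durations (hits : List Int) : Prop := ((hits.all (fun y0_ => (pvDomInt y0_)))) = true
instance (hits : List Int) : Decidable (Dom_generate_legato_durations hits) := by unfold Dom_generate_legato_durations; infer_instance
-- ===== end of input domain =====

-- B replaces A's index-collect-and-zip construction by a single reverse pass
-- carrying the distance to the next onset (objective: alternative decomposition).


-- ===== PORT A =====
def generate_legato_durations (hits : List Int) : List Int :=
  if hits = [] then []
  else
    let note_on_indices : List Int :=
      ((PySem.List.enumerate hits).filter (fun p => p.2 != 0)).map (fun p => p.1)
    let note_on_indices := note_on_indices ++ [(hits.length : Int)]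
    let durations := List.replicate hits.length (0 : Int)
    (List.zip (PySem.List.slice note_on_indices none (some (-1)))
              (PySem.List.slice note_on_indices (some 1) none)).foldl
      (fun d p => PySem.List.pySetD d p.1 (max 1 (p.2 - p.1))) durations

-- ===== PORT B =====
def generate_legato_durations_alt (hits : List Int) : List Int :=
  let r := hits.reverse.foldl
    (fun (s : Int × List Int) hit =>
      let gap := s.1 + 1
      let durs := s.2 ++ [if hit != 0 then gap else 0]
      (if hit != 0 then 0 else gap, durs))
    ((0 : Int), ([] : List Int))
  r.2.reverse

-- ===== PRECONDITION & SPEC =====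
def Spec_generate_legato_durations (hits : List Int) (out : List Int) : Prop := out = generate_legato_durations_alt hits
instance (hits : List Int) (out : List Int) : Decidable (Spec_generate_legato_durations hits out) := by unfold Spec_generate_legato_durations; infer_instance

-- ===== CLAIM (what is proved, stated in full; the proofs are below) =====
def Claim_equal_generate_legato_durations : Prop := ∀ (hits : List Int), Dom_generate_legato_durations hits → Spec_generate_legato_durations hits (generate_legato_durations hits)

-- ===== LEMMAS AND PROOFS =====

/-- Distance from the front of `t` to its first note-on (`t.length` if none). -/
def gapOf : List Int → Int
  | [] => 0
  | h :: t => if h ≠ 0 then 0 else gapOf t + 1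

/-- Reference value of the function. -/
def leg : List Int → List Int
  | [] => []
  | h :: t => (if h ≠ 0 then gapOf t + 1 else 0) :: leg t

/-- Note-on indices of `xs`, enumerated from `s`. -/
def onsets (s : Int) (xs : List Int) : List Int :=
  ((PySem.List.enumerate xs s).filter (fun p => p.2 != 0)).map (fun p => p.1)

def setStep (d : List Int) (p : Int × Int) : List Int :=
  PySem.List.pySetD d p.1 (max 1 (p.2 - p.1))

def pairs (xs : List Int) : List (Int × Int) := List.zip xs.dropLast xs.tail

/-- A's else-branch, with the slices rewritten to dropLast/tail. -/
def bodyA (hits : List Int) : List Int :=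
  (pairs (onsets 0 hits ++ [(hits.length : Int)])).foldl setStep
    (List.replicate hits.length (0 : Int))

theorem A_eq_bodyA (hits : List Int) : generate_legato_durations hits = bodyA hits := by
  cases hits with
  | nil => rfl
  | cons h t =>
      simp only [generate_legato_durations, bodyA, onsets, pairs,
        PySem.List.slice_to_neg_one, PySem.List.slice_from_one,
        if_neg (List.cons_ne_nil h t)]
      rfl

theorem onsets_cons (s : Int) (x : Int) (xs : List Int) :
    onsets s (x :: xs) = (if x ≠ 0 then [s] else []) ++ onsets (s + 1) xs := by
  by_cases hx : x = 0 <;>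
    simp [onsets, PySem.List.enumerate_cons, hx]

theorem onsets_shift (xs : List Int) : ∀ s : Int,
    onsets (s + 1) xs = (onsets s xs).map (· + 1) := by
  induction xs with
  | nil => intro s; simp [onsets]
  | cons x xs ih =>
      intro s
      rw [onsets_cons, onsets_cons, ih (s + 1), List.map_append]
      by_cases hx : x = 0 <;> simp [hx]

theorem onsets_nonneg (xs : List Int) : ∀ s : Int, ∀ p ∈ onsets s xs, s ≤ p := by
  induction xs with
  | nil => intro s p hp; simp [onsets] at hp
  | cons x xs ih =>
      intro s p hp
      rw [onsets_cons] at hp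
      rcases List.mem_append.1 hp with h1 | h2
      · by_cases hx : x = 0 <;> simp [hx] at h1 <;> omega
      · have := ih (s + 1) p h2; omega

theorem gapOf_nonneg (t : List Int) : 0 ≤ gapOf t := by
  induction t with
  | nil => simp [gapOf]
  | cons h t ih => by_cases hh : h = 0 <;> simp [gapOf, hh] <;> omega

theorem list_shift (t : List Int) :
    onsets (0 + 1) t ++ [((t.length : Int) + 1)]
      = ((onsets 0 t) ++ [(t.length : Int)]).map (· + 1) := by
  rw [onsets_shift t 0, List.map_append]
  simp

theorem head_struct (t : List Int) :
    ∃ r, onsets 0 t ++ [(t.length : Int)] = gapOf t :: r := by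
  induction t with
  | nil => exact ⟨[], by simp [onsets, gapOf]⟩
  | cons h t ih =>
      rcases ih with ⟨r, hr⟩
      rw [onsets_cons]
      by_cases hh : h = 0
      · subst hh
        refine ⟨r.map (· + 1), ?_⟩
        rw [show ((((0:Int) :: t : List Int)).length : Int) = (t.length : Int) + 1 from by simp]
        simp only [ne_eq, not_true_eq_false, if_false, List.nil_append]
        rw [list_shift t, hr]
        simp [gapOf]
      · refine ⟨onsets (0 + 1) t ++ [((h :: t : List Int).length : Int)], ?_⟩
        simp [hh, gapOf]

theorem setStep_cons_shift (x : Int) (d : List Int) (a b : Int) (ha : 0 ≤ a) :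
    setStep (x :: d) (a + 1, b + 1) = x :: setStep d (a, b) := by
  simp only [setStep]
  have hv : max 1 (b + 1 - (a + 1)) = max 1 (b - a) := by ring_nf
  rw [hv,
    PySem.List.pySetD_of_nonneg (x :: d) _ (by omega : (0:Int) ≤ a + 1),
    PySem.List.pySetD_of_nonneg d _ ha,
    show (a + 1).toNat = a.toNat + 1 by omega]
  simp [List.set]

theorem fold_shift (ps : List (Int × Int)) : ∀ (x : Int) (d : List Int),
    (∀ p ∈ ps, 0 ≤ p.1) →
    (ps.map (fun p => (p.1 + 1, p.2 + 1))).foldl setStep (x :: d)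
      = x :: ps.foldl setStep d := by
  induction ps with
  | nil => intro x d _; simp
  | cons p ps ih =>
      intro x d hnn
      simp only [List.map_cons, List.foldl_cons]
      rw [setStep_cons_shift x d p.1 p.2 (hnn p (List.mem_cons_self ..)),
        ih x _ (fun q hq => hnn q (List.mem_cons_of_mem _ hq))]

theorem pairs_map_shift (xs : List Int) :
    pairs (xs.map (· + 1)) = (pairs xs).map (fun p => (p.1 + 1, p.2 + 1)) := by
  simp only [pairs, ← List.map_dropLast, ← List.map_tail, List.zip_map]
  simp [Prod.map]

theorem pairs_mem_fst (xs : List Int) (p : Int × Int) (hp : p ∈ pairs xs) : p.1 ∈ xs := by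
  have := List.of_mem_zip hp
  exact List.dropLast_subset xs this.1

theorem bodyA_eq_leg (hits : List Int) : bodyA hits = leg hits := by
  induction hits with
  | nil => rfl
  | cons h t ih =>
      have hnn : ∀ p ∈ pairs (onsets 0 t ++ [(t.length : Int)]), 0 ≤ p.1 := by
        intro p hp
        rcases List.mem_append.1 (pairs_mem_fst _ p hp) with h1 | h2
        · exact onsets_nonneg t 0 p.1 h1
        · simp at h2; omega
      by_cases hh : h = 0
      · subst hh
        unfold bodyA
        rw [onsets_cons]
        rw [show ((((0:Int) :: t : List Int)).length : Int) = (t.length : Int) + 1 from by simp]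
        simp only [ne_eq, not_true_eq_false, if_false, List.nil_append]
        rw [list_shift t, pairs_map_shift, List.length_cons, List.replicate_succ,
          fold_shift _ _ _ hnn]
        have hb : (pairs (onsets 0 t ++ [(t.length : Int)])).foldl setStep
            (List.replicate t.length 0) = bodyA t := rfl
        rw [hb, ih]
        simp [leg]
      · obtain ⟨r, hr⟩ := head_struct t
        unfold bodyA
        rw [onsets_cons]
        rw [show (((h :: t : List Int)).length : Int) = (t.length : Int) + 1 from by simp]
        simp only [hh, ne_eq, not_false_eq_true, if_true, List.cons_append,
          List.nil_append]
        rw [list_shift t, hr]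
        -- the index list is 0 :: (gapOf t + 1) :: r.map (· + 1)
        simp only [List.map_cons, pairs, List.dropLast_cons₂, List.tail_cons,
          List.zip_cons_cons, List.foldl_cons]
        have hstep : setStep (List.replicate (h :: t : List Int).length 0)
            (0, gapOf t + 1) = (gapOf t + 1) :: List.replicate t.length 0 := by
          have hg := gapOf_nonneg t
          simp only [setStep]
          rw [PySem.List.pySetD_of_nonneg _ _ (le_refl (0:Int))]
          simp [List.replicate_succ]
          omega
        rw [hstep]
        have hz : List.zip ((gapOf t + 1) :: r.map (· + 1)).dropLast (r.map (· + 1))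
            = (pairs (onsets 0 t ++ [(t.length : Int)])).map (fun p => (p.1 + 1, p.2 + 1)) := by
          rw [← pairs_map_shift, hr]
          simp [pairs]
        rw [hz, fold_shift _ _ _ hnn]
        have hb : (pairs (onsets 0 t ++ [(t.length : Int)])).foldl setStep
            (List.replicate t.length 0) = bodyA t := rfl
        rw [hb, ih]
        simp [leg, hh]

theorem alt_foldr (hits : List Int) :
    hits.foldr
      (fun hit (s : Int × List Int) =>
        (if hit != 0 then 0 else s.1 + 1, s.2 ++ [if hit != 0 then s.1 + 1 else 0]))
      ((0 : Int), ([] : List Int))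
      = (gapOf hits, (leg hits).reverse) := by
  induction hits with
  | nil => simp [gapOf, leg]
  | cons h t ih =>
      simp only [List.foldr_cons, ih]
      by_cases hh : h = 0 <;> simp [gapOf, leg, hh]

theorem alt_eq_leg (hits : List Int) : generate_legato_durations_alt hits = leg hits := by
  simp only [generate_legato_durations_alt, List.foldl_reverse]
  rw [alt_foldr]
  simp

-- ===== VERDICT (by name: the statement is the Claim_ definition above) =====
theorem generate_legato_durations_spec : Claim_equal_generate_legato_durations := by
  intro hits _
  unfold Spec_generate_legato_durations
  rw [A_eq_bodyA, bodyA_eq_leg, alt_eq_leg]
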